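-- pv_equiv track=rewrite | github.com/justbill2020/cc-quotebook | compile_sheets.py | filter_cells
-- ===== SOURCE A (Python) =====
-- def filter_cells(filt, x):
--     '''Return true if x does not include any substrings in filt
--     '''
--     passing = True
--     for val in x:
--         for fv in filt:
--             if str(fv) in str(val):
--                 passing = False
--                 break
--         if not passing:
--             break
--     return passing
-- ===== SOURCE B (Python) =====
-- def filter_cells(filt, x):
--     '''Return true if x does not include any substrings in filt'''
--     pats = [str(fv) for fv in filt]
--     for val in x:
--         s = str(val)
--         for i in range(len(s) + 1):
--             if any(s.startswith(p, i) for p in pats):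
--                 return False
--     return True
-- ===== Notes on version B (the rewrite author's own statement) =====
-- stated objective: alternative
-- what changed: Replaces the per-pair built-in substring test ('fv in val' inside flag-and-break nested loops) with an explicit alignment scan: for each value, every start position i is tried and each pattern is checked with startswith(p, i), i.e. manual multi-pattern matching at each alignment instead of repeated substring searches.
import Mathlib
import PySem

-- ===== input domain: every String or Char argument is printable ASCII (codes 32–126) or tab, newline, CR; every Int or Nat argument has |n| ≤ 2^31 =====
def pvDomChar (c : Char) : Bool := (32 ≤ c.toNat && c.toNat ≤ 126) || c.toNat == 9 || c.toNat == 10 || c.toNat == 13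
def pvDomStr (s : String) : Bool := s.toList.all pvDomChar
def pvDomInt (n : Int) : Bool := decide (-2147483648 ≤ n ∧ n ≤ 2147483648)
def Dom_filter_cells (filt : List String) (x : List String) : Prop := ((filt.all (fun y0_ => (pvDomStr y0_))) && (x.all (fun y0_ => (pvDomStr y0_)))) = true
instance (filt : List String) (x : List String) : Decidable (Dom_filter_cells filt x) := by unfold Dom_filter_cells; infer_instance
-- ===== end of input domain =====

-- B replaces A's per-pair built-in substring test with an explicit alignment scan
-- (every start position i, startswith at i for each pattern); alternative algorithm, same result.

-- ===== PORT A =====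
-- inner 'for fv in filt' loop: the 'passing' flag after the loop (break = stop at first hit)
def fcInner (filt : List String) (val : String) : Bool :=
  match filt with
  | [] => true
  | fv :: rest => if PySem.Str.isIn fv val then false else fcInner rest val

-- outer 'for val in x' loop with its break once passing is false
def fcOuter (filt : List String) (x : List String) : Bool :=
  match x with
  | [] => true
  | val :: rest => if fcInner filt val then fcOuter filt rest else false

def filter_cells (filt : List String) (x : List String) : Bool :=
  fcOuter filt x

-- ===== PORT B =====
-- 'any(s.startswith(p, i) for p in pats)': does some pattern start at alignment i of s?
def fcAltHit (pats : List String) (s : List Char) (i : Nat) : Bool :=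
  pats.any (fun p => PySem.Chars.startswith (s.drop i) p.toList)

-- 'for i in range(len(s)+1): if …: return False' for one value
def fcAltVal (pats : List String) (s : List Char) : Bool :=
  (List.range (s.length + 1)).all (fun i => ! fcAltHit pats s i)

def filter_cells_alt (filt : List String) (x : List String) : Bool :=
  x.all (fun val => fcAltVal filt val.toList)

-- ===== PRECONDITION & SPEC =====
def Spec_filter_cells (filt : List String) (x : List String) (out : Bool) : Prop := out = filter_cells_alt filt x
instance (filt : List String) (x : List String) (out : Bool) : Decidable (Spec_filter_cells filt x out) := by unfold Spec_filter_cells; infer_instance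

-- ===== CLAIM (what is proved, stated in full; the proofs are below) =====
def Claim_equal_filter_cells : Prop := ∀ (filt : List String) (x : List String), Dom_filter_cells filt x → Spec_filter_cells filt x (filter_cells filt x)

-- ===== LEMMAS AND PROOFS =====

-- B's alignment scan for one pattern finds exactly the substring relation A's 'in' tests
lemma range_prefix_iff_isIn (p s : List Char) :
    ((List.range (s.length + 1)).any (fun i => PySem.Chars.startswith (s.drop i) p))
      = PySem.Chars.isIn p s := by
  rw [Bool.eq_iff_iff, ← PySem.Chars.exists_prefix_drop_iff_isIn]
  simp only [List.any_eq_true, List.mem_range, PySem.Chars.startswith_iff]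
  constructor
  · rintro ⟨i, _, h⟩; exact ⟨i, h⟩
  · rintro ⟨j, h⟩
    refine ⟨min j s.length, by omega, ?_⟩
    rcases le_or_gt j s.length with hj | hj
    · simpa [Nat.min_eq_left hj] using h
    · have : List.drop j s = [] := List.drop_eq_nil_of_le (by omega)
      simp only [Nat.min_eq_right (le_of_lt hj), List.drop_length]
      simpa [this] using h

-- per-value agreement: A's inner flag loop = B's alignment scan
lemma fcAltVal_eq_fcInner (pats : List String) (val : String) :
    fcAltVal pats val.toList = fcInner pats val := by
  have hA : fcInner pats val = ! pats.any (fun fv => PySem.Str.isIn fv val) := by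
    induction pats with
    | nil => rfl
    | cons fv rest ih => simp [fcInner, List.any_cons, ih]
  rw [hA, fcAltVal]
  rw [show ((List.range (val.toList.length + 1)).all (fun i => ! fcAltHit pats val.toList i))
      = ! (List.range (val.toList.length + 1)).any (fun i => fcAltHit pats val.toList i) from by
    simp [List.all_eq_not_any_not]]
  congr 1
  rw [Bool.eq_iff_iff]
  simp only [List.any_eq_true, fcAltHit]
  constructor
  · rintro ⟨i, hi, p, hp, h⟩
    refine ⟨p, hp, ?_⟩
    have := (range_prefix_iff_isIn p.toList val.toList)
    rw [Bool.eq_iff_iff] at this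
    have hin := this.1 (by simpa using List.any_eq_true.2 ⟨i, hi, h⟩)
    simpa [PySem.Str.isIn] using hin
  · rintro ⟨p, hp, h⟩
    have : PySem.Chars.isIn p.toList val.toList = true := by
      simpa [PySem.Str.isIn] using h
    rw [← range_prefix_iff_isIn] at this
    obtain ⟨i, hi, h'⟩ := List.any_eq_true.1 this
    exact ⟨i, hi, p, hp, h'⟩

lemma fcOuter_eq_all (filt : List String) (x : List String) :
    fcOuter filt x = x.all (fun val => fcInner filt val) := by
  induction x with
  | nil => rfl
  | cons val rest ih =>
    simp only [fcOuter, List.all_cons, ih]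
    split_ifs with h <;> simp [h]

-- ===== VERDICT (by name: the statement is the Claim_ definition above) =====
theorem filter_cells_spec : Claim_equal_filter_cells := by
  intro filt x _
  unfold Spec_filter_cells filter_cells filter_cells_alt
  rw [fcOuter_eq_all]
  simp only [fcAltVal_eq_fcInner]
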